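-- pv_equiv track=rewrite | github.com/hplt-project/OpusTrainer | src/opustrainer/modifiers/placeholders.py | filter_tuples
-- ===== SOURCE A (Python) =====
-- from operator import itemgetter
-- from typing import Set, List, Tuple, Optional, Protocol, TypeVar, Iterable
--
-- def filter_tuples(inlist: List[Tuple[int, int]]) -> List[Tuple[int, int]]:
--     """Removes places non x->y x->z type of alignments. Remove anything that is found multiple
--        times. Anything that is found multiple times means non bijective alignment. Since they
--        are sorted, we can reduce some time complexity
--     """
--     inlist.sort(key=itemgetter(0))
--     new_list: List[Tuple[int, int]] = []
--     blacklisted: Set[int] = set()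
--     for i, (curr, _) in enumerate(inlist):
--         # Skip blacklisted ones
--         if curr in blacklisted:
--             continue
--
--         # Skip (and blacklist) any (x,y) pairs that are followed by (x,_) pairs
--         if i < len(inlist) - 1 and curr == inlist[i+1][0]:
--             blacklisted.add(curr)
--             continue
--
--         # Keep the rest, pairs like (x,_) where `x` did only occur once in the
--         # first position among all of the tuples in `inlist`.
--         new_list.append(inlist[i])
--     return new_list
-- ===== SOURCE B (Python) =====
-- from operator import itemgetter
-- from collections import Counter
--
-- def filter_tuples(inlist):
--     inlist.sort(key=itemgetter(0))
--     counts = Counter(x for x, _ in inlist)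
--     return [t for t in inlist if counts[t[0]] == 1]
-- ===== Notes on version B (the rewrite author's own statement) =====
-- stated objective: simpler
-- what changed: Replaces A's single pass with neighbour look-ahead and a growing blacklist set by a frequency table (Counter of first components) followed by a plain filter keeping tuples whose first component occurs exactly once; the in-place sort is kept.
import Mathlib
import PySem

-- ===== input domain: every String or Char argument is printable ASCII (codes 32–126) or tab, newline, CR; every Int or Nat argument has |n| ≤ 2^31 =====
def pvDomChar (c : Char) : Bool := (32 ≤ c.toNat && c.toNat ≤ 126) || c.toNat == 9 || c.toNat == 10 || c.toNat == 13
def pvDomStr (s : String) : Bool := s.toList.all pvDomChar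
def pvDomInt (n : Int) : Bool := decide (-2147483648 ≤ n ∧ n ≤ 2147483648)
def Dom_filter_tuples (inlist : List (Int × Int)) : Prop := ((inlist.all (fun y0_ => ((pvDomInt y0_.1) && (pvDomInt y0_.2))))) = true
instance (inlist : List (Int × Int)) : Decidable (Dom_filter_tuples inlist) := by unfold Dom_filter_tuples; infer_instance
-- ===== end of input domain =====

-- B replaces A's neighbour-look-ahead pass with a blacklist set by a Counter of first
-- components plus a plain filter (objective: simpler). Both A and B sort inlist in place
-- (same mutation); the theorem is about the return value.


-- ===== PORT A =====
-- A's loop over the sorted list: skip blacklisted firsts, blacklist-and-skip a first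
-- repeated at the next position (the look-ahead inlist[i+1][0]), append the rest.
def pvLoopA : PySem.Set Int → List (Int × Int) → List (Int × Int)
  | _, [] => []
  | bl, t :: rest =>
    if PySem.Set.contains bl t.1 then pvLoopA bl rest
    else
      match rest with
      | [] => [t]
      | u :: _ => if t.1 = u.1 then pvLoopA (PySem.Set.add bl t.1) rest
                  else t :: pvLoopA bl rest

def filter_tuples (inlist : List (Int × Int)) : List (Int × Int) :=
  pvLoopA PySem.Set.empty (PySem.List.sorted inlist (fun t => t.1) false)

-- ===== PORT B =====
def filter_tuples_alt (inlist : List (Int × Int)) : List (Int × Int) :=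
  let ys := PySem.List.sorted inlist (fun t => t.1) false
  let counts := PySem.Dict.counter (ys.map (fun t => t.1))
  ys.filter (fun t => counts.getD t.1 0 == 1)

-- ===== PRECONDITION & SPEC =====
def Spec_filter_tuples (inlist : List (Int × Int)) (out : List (Int × Int)) : Prop := out = filter_tuples_alt inlist
instance (inlist : List (Int × Int)) (out : List (Int × Int)) : Decidable (Spec_filter_tuples inlist out) := by unfold Spec_filter_tuples; infer_instance

-- ===== CLAIM (what is proved, stated in full; the proofs are below) =====
def Claim_equal_filter_tuples : Prop := ∀ (inlist : List (Int × Int)), Dom_filter_tuples inlist → Spec_filter_tuples inlist (filter_tuples inlist)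

-- ===== LEMMAS AND PROOFS =====

-- pvLoopA only looks at the blacklist through membership of the firsts of its list
theorem pvLoopA_congr : ∀ (ys : List (Int × Int)) (bl bl' : PySem.Set Int),
    (∀ t ∈ ys, PySem.Set.contains bl t.1 = PySem.Set.contains bl' t.1) →
    pvLoopA bl ys = pvLoopA bl' ys := by
  intro ys
  induction ys with
  | nil => intro bl bl' _; simp [pvLoopA]
  | cons t rest ih =>
    intro bl bl' h
    have ht := h t (by simp)
    simp only [pvLoopA]
    rw [ht]
    by_cases hc : PySem.Set.contains bl' t.1 = true
    · simp only [hc, if_true]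
      exact ih bl bl' (fun x hx => h x (by simp [hx]))
    · simp only [Bool.not_eq_true] at hc
      simp only [hc, Bool.false_eq_true, if_false]
      match rest, ih, h with
      | [], _, _ => rfl
      | u :: rest', ih, h =>
        by_cases he : t.1 = u.1
        · simp only [he, if_true]
          apply ih
          intro x hx
          have hx' := h x (by simp [hx])
          simp only [PySem.Set.contains] at hx' ⊢
          simp only [List.contains_eq_mem] at hx'
          simp [PySem.Set.mem_add, hx']
        · simp only [if_neg he]
          rw [ih bl bl' (fun x hx => h x (by simp [hx]))]

-- while the head's first is blacklisted, pvLoopA just skips it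
theorem pvLoopA_dropWhile (c : Int) : ∀ (ys : List (Int × Int)) (bl : PySem.Set Int),
    PySem.Set.contains bl c = true →
    pvLoopA bl ys = pvLoopA bl (ys.dropWhile (fun t => t.1 == c)) := by
  intro ys
  induction ys with
  | nil => intro bl _; rfl
  | cons t rest ih =>
    intro bl hc
    rw [List.dropWhile_cons]
    by_cases he : t.1 = c
    · have hcont : PySem.Set.contains bl t.1 = true := he ▸ hc
      have h1 : pvLoopA bl (t :: rest) = pvLoopA bl rest := by
        simp only [pvLoopA, hcont, if_true]
      simp only [he, beq_self_eq_true, if_true]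
      rw [h1, ih bl hc]
    · simp [he]

-- main loop characterisation on a key-sorted list with an untouched blacklist
theorem pvLoopA_main : ∀ (n : Nat) (ys : List (Int × Int)) (bl : PySem.Set Int),
    ys.length ≤ n →
    ys.Pairwise (fun a b => a.1 ≤ b.1) →
    (∀ t ∈ ys, PySem.Set.contains bl t.1 = false) →
    pvLoopA bl ys = ys.filter (fun t => ys.countP (fun u => u.1 == t.1) == 1) := by
  intro n
  induction n with
  | zero =>
    intro ys bl hlen _ _
    have : ys = [] := List.eq_nil_of_length_eq_zero (Nat.le_zero.mp hlen)
    subst this; rfl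
  | succ n ih =>
    intro ys bl hlen hsort hbl
    match ys with
    | [] => rfl
    | t :: rest =>
      have hct : PySem.Set.contains bl t.1 = false := hbl t (by simp)
      match rest with
      | [] =>
        simp only [pvLoopA, hct]; simp
      | u :: rest' =>
        have hle : ∀ x ∈ u :: rest', t.1 ≤ x.1 := fun x hx => (List.pairwise_cons.mp hsort).1 x hx
        have hsrest : (u :: rest').Pairwise (fun a b => a.1 ≤ b.1) := (List.pairwise_cons.mp hsort).2
        by_cases he : t.1 = u.1
        · -- repeated first: blacklist t.1 and skip the whole run of t.1
          have hstep : pvLoopA bl (t :: u :: rest') = pvLoopA (PySem.Set.add bl t.1) (u :: rest') := by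
            simp only [pvLoopA, hct]; simp [he]
          have hccontains : PySem.Set.contains (PySem.Set.add bl t.1) t.1 = true := by
            simp [PySem.Set.contains, PySem.Set.mem_add]
          set tail := (u :: rest').dropWhile (fun x => x.1 == t.1) with htail
          have hsub : tail.Sublist (u :: rest') := List.dropWhile_sublist _
          -- every element of tail has first strictly greater than t.1
          have htailgt : ∀ x ∈ tail, t.1 < x.1 := by
            intro x hx
            cases h : tail with
            | nil => rw [h] at hx; simp at hx
            | cons v tail' =>
              have hvne : ¬ (v.1 = t.1) := by
                have hh := List.head?_dropWhile_not (fun x => x.1 == t.1) (u :: rest')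
                rw [← htail, h] at hh
                simpa using hh
              have hvle : t.1 ≤ v.1 := hle v (hsub.subset (by simp [h]))
              have hvlt : t.1 < v.1 := lt_of_le_of_ne hvle (fun hh => hvne hh.symm)
              rw [h] at hx
              rcases List.mem_cons.mp hx with rfl | hx'
              · exact hvlt
              · have hpt : (v :: tail').Pairwise (fun a b => a.1 ≤ b.1) :=
                  List.Pairwise.sublist (h ▸ hsub) hsrest
                exact lt_of_lt_of_le hvlt ((List.pairwise_cons.mp hpt).1 x hx')
          have hcongr : pvLoopA (PySem.Set.add bl t.1) tail = pvLoopA bl tail := by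
            apply pvLoopA_congr
            intro x hx
            have hne : x.1 ≠ t.1 := ne_of_gt (htailgt x hx)
            simp [PySem.Set.contains, PySem.Set.mem_add, hne]
          have hIH : pvLoopA bl tail = tail.filter (fun x => tail.countP (fun u' => u'.1 == x.1) == 1) := by
            apply ih tail bl
            · have h2 : tail.length ≤ rest'.length + 1 := by simpa using hsub.length_le
              simp only [List.length_cons] at hlen; omega
            · exact List.Pairwise.sublist hsub hsrest
            · exact fun x hx => hbl x (by simp [hsub.subset hx])
          -- decompose u :: rest' = run ++ tail, run all with first = t.1
          set run := (u :: rest').takeWhile (fun x => x.1 == t.1) with hrun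
          have hdecomp : run ++ tail = u :: rest' := List.takeWhile_append_dropWhile
          have hrunc : ∀ x ∈ run, x.1 = t.1 := by
            intro x hx
            have := List.mem_takeWhile_imp (hrun ▸ hx)
            simpa using this
          have hu1 : u.1 = t.1 := he.symm
          have hruncons : run = u :: (List.takeWhile (fun x => x.1 == t.1) rest') := by
            rw [hrun, List.takeWhile_cons]; simp [hu1]
          have hrunlen : 1 ≤ run.length := by rw [hruncons]; simp
          have hcount_tail_t : tail.countP (fun u' => u'.1 == t.1) = 0 := by
            rw [List.countP_eq_zero]
            intro x hx
            simpa using ne_of_gt (htailgt x hx)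
          -- everything in count form over t :: (run ++ tail)
          have hLgoal : (t :: u :: rest' : List (Int × Int)) = t :: (run ++ tail) := by rw [hdecomp]
          have hcount_t : (t :: (run ++ tail)).countP (fun u' => u'.1 == t.1) = 1 + run.length := by
            rw [List.countP_cons, List.countP_append, hcount_tail_t]
            have : run.countP (fun u' => u'.1 == t.1) = run.length := by
              rw [List.countP_eq_length]
              intro x hx; simpa using hrunc x hx
            simp [this]; omega
          have hne1 : ((t :: (run ++ tail)).countP (fun u' => u'.1 == t.1) == 1) = false := by
            rw [hcount_t]; simp only [beq_eq_false_iff_ne, ne_eq]; omega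
          rw [hstep, pvLoopA_dropWhile t.1 _ _ hccontains, ← htail, hcongr, hIH, hLgoal]
          rw [List.filter_cons]
          simp only [hne1, Bool.false_eq_true, if_false]
          rw [List.filter_append]
          have hrunfilter : run.filter (fun x => (t :: (run ++ tail)).countP (fun u' => u'.1 == x.1) == 1) = [] := by
            rw [List.filter_eq_nil_iff]
            intro x hx
            rw [hrunc x hx, hne1]; simp
          rw [hrunfilter, List.nil_append]
          symm
          apply List.filter_congr
          intro x hx
          have hxne : ∀ y ∈ t :: run, (y.1 == x.1) = false := by
            intro y hy
            have hygt : y.1 < x.1 := by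
              rcases List.mem_cons.mp hy with rfl | hy'
              · exact htailgt x hx
              · rw [hrunc y hy']; exact htailgt x hx
            simpa using ne_of_lt hygt
          have hloc : (t :: (run ++ tail)).countP (fun u' => u'.1 == x.1) = tail.countP (fun u' => u'.1 == x.1) := by
            rw [show (t :: (run ++ tail) : List (Int × Int)) = (t :: run) ++ tail from rfl]
            rw [List.countP_append]
            have : (t :: run).countP (fun u' => u'.1 == x.1) = 0 :=
              List.countP_eq_zero.mpr (fun y hy => by simp [hxne y hy])
            omega
          rw [hloc]
        · -- unique first: keep t, recurse on rest
          have hgt : ∀ x ∈ u :: rest', t.1 < x.1 := by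
            intro x hx
            have hul : t.1 < u.1 := lt_of_le_of_ne (hle u (by simp)) he
            rcases List.mem_cons.mp hx with rfl | hx'
            · exact hul
            · exact lt_of_lt_of_le hul ((List.pairwise_cons.mp hsrest).1 x hx')
          have hcount_rest_t : (u :: rest').countP (fun u' => u'.1 == t.1) = 0 :=
            List.countP_eq_zero.mpr (fun x hx => by simpa using (ne_of_gt (hgt x hx)))
          have hcount_t : (t :: u :: rest').countP (fun u' => u'.1 == t.1) = 1 := by
            rw [List.countP_cons, hcount_rest_t]; simp
          have hIH : pvLoopA bl (u :: rest') = (u :: rest').filter (fun x => (u :: rest').countP (fun u' => u'.1 == x.1) == 1) := by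
            apply ih _ bl
            · simp only [List.length_cons] at hlen ⊢; omega
            · exact hsrest
            · exact fun x hx => hbl x (by simp [hx])
          have hstep : pvLoopA bl (t :: u :: rest') = t :: pvLoopA bl (u :: rest') := by
            simp only [pvLoopA, hct]; simp [he]
          have hfc : (t :: u :: rest').filter (fun x => (t :: u :: rest').countP (fun u' => u'.1 == x.1) == 1)
              = t :: (u :: rest').filter (fun x => (t :: u :: rest').countP (fun u' => u'.1 == x.1) == 1) := by
            rw [List.filter_cons]; simp [hcount_t]
          rw [hstep, hIH, hfc]
          congr 1
          apply List.filter_congr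
          intro x hx
          have hloc : (t :: u :: rest').countP (fun u' => u'.1 == x.1) = (u :: rest').countP (fun u' => u'.1 == x.1) := by
            rw [List.countP_cons]
            have : (t.1 == x.1) = false := by simpa using ne_of_lt (hgt x hx)
            simp [this]
          rw [hloc]

-- the Counter of the firsts counts exactly the matching firsts
theorem counts_getD (ys : List (Int × Int)) (c : Int) :
    (PySem.Dict.counter (ys.map (fun t => t.1))).getD c 0
      = (ys.countP (fun u => u.1 == c) : Int) := by
  rw [PySem.Dict.getD_counter]
  congr 1
  rw [List.count_eq_countP, List.countP_map]
  rfl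

-- ===== VERDICT (by name: the statement is the Claim_ definition above) =====
theorem filter_tuples_spec : Claim_equal_filter_tuples := by
  intro inlist _
  unfold Spec_filter_tuples filter_tuples filter_tuples_alt
  set ys := PySem.List.sorted inlist (fun t => t.1) false with hys
  have hsort : ys.Pairwise (fun a b => a.1 ≤ b.1) := PySem.List.sorted_pairwise inlist _
  rw [pvLoopA_main ys.length ys PySem.Set.empty le_rfl hsort
      (fun t _ => by simp [PySem.Set.contains, PySem.Set.empty])]
  apply List.filter_congr
  intro t _
  rw [counts_getD]
  simp
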